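-- pv_equiv track=rewrite | github.com/quangtrinh25/AIO2025 | model/behrt_model.py | position_idx
-- ===== SOURCE A (Python) =====
-- SEP = 2
--
-- def position_idx(tokens, symbol=SEP):
--     pos = []
--     flag = 0
--
--     for token in tokens:
--         if token == symbol:
--             pos.append(flag)
--             flag += 1
--         else:
--             pos.append(flag)
--     return pos
-- ===== SOURCE B (Python) =====
-- SEP = 2
--
-- def position_idx(tokens, symbol=SEP):
--     # Indicator list, then EXCLUSIVE prefix sums: out[i] = number of SEPs before i.
--     ind = [1 if t == symbol else 0 for t in tokens]
--     out = [0] * len(ind)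
--     for i in range(1, len(ind)):
--         out[i] = out[i - 1] + ind[i - 1]
--     return out
-- ===== Notes on version B (the rewrite author's own statement) =====
-- stated objective: alternative
-- what changed: Replaces the single fused loop with an inline mutable flag by a two-pass formulation: an indicator list (1 where token == symbol) followed by an exclusive prefix sum, so each output is the count of symbols strictly before that position.
import Mathlib
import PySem

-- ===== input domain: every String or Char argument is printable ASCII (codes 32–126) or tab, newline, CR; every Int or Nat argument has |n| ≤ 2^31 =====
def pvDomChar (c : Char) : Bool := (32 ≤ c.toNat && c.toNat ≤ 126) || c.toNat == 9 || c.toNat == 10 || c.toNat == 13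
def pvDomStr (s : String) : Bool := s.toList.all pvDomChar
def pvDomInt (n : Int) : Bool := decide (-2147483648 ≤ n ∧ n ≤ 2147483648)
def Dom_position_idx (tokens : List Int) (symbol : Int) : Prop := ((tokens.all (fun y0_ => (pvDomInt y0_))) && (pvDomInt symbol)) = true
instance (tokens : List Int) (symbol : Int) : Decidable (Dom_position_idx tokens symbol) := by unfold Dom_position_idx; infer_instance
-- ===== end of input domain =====

-- B replaces A's fused loop with running flag by an indicator list plus an exclusive
-- prefix sum (alternative decomposition, same O(n) cost).

-- ===== PORT A =====
-- A: one loop appending the running flag, incrementing it on each symbol.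
def position_idx (tokens : List Int) (symbol : Int) : List Int :=
  (tokens.foldl
    (fun (st : List Int × Int) token =>
      if token == symbol then (st.1 ++ [st.2], st.2 + 1)
      else (st.1 ++ [st.2], st.2))
    ([], 0)).1

-- ===== PORT B =====
-- exclusive prefix sum: element i is the sum of the first i inputs (Source B's out-array loop)
def pvExclScan (acc : Int) : List Int → List Int
  | [] => []
  | x :: xs => acc :: pvExclScan (acc + x) xs

def position_idx_alt (tokens : List Int) (symbol : Int) : List Int :=
  pvExclScan 0 (tokens.map (fun t => if t == symbol then (1 : Int) else 0))

-- ===== PRECONDITION & SPEC =====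
def Spec_position_idx (tokens : List Int) (symbol : Int) (out : List Int) : Prop := out = position_idx_alt tokens symbol
instance (tokens : List Int) (symbol : Int) (out : List Int) : Decidable (Spec_position_idx tokens symbol out) := by unfold Spec_position_idx; infer_instance

-- ===== CLAIM (what is proved, stated in full; the proofs are below) =====
def Claim_equal_position_idx : Prop := ∀ (tokens : List Int) (symbol : Int), Dom_position_idx tokens symbol → Spec_position_idx tokens symbol (position_idx tokens symbol)

-- ===== LEMMAS AND PROOFS =====
theorem position_idx_fold_eq (symbol : Int) :
    ∀ (tokens : List Int) (pos : List Int) (flag : Int),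
      (tokens.foldl
        (fun (st : List Int × Int) token =>
          if token == symbol then (st.1 ++ [st.2], st.2 + 1)
          else (st.1 ++ [st.2], st.2))
        (pos, flag)).1
      = pos ++ pvExclScan flag (tokens.map (fun t => if t == symbol then (1 : Int) else 0)) := by
  intro tokens
  induction tokens with
  | nil => intro pos flag; simp [pvExclScan]
  | cons t ts ih =>
    intro pos flag
    simp only [beq_iff_eq] at ih
    simp only [List.foldl_cons, List.map_cons, beq_iff_eq]
    by_cases h : t = symbol
    · rw [if_pos h, ih, pvExclScan]
      simp [h]
    · rw [if_neg h, ih, pvExclScan]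
      simp [h]

-- ===== VERDICT (by name: the statement is the Claim_ definition above) =====
theorem position_idx_spec : Claim_equal_position_idx := by
  intro tokens symbol _
  unfold Spec_position_idx position_idx position_idx_alt
  simpa using position_idx_fold_eq symbol tokens [] 0
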